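-- pv_equiv track=rewrite | github.com/StopSoo/PS | Programmers/Lv.1/Py/대충 만든 자판.py | solution
-- ===== SOURCE A (Python) =====
-- def solution(keymap, targets):
--     answer = []
--     keyCount = { chr(i + 65): -1 for i in range(26) } # 가장 적은 키 터치 수 저장하는 딕셔너리
--
--     for i in range(26):
--         ch = chr(i + 65)
--         indexs = [km.index(ch) for km in keymap if ch in km]
--         if indexs:
--             keyCount[ch] = min(indexs) + 1
--
--     for target in targets:
--         s = 0
--         for t in target:
--             if keyCount[t] != -1:
--                 s += keyCount[t]
--             else: # 해당 문자를 입력할 수 없는 경우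
--                 s = -1
--                 break
--
--         answer.append(s)
--
--     return answer
-- ===== SOURCE B (Python) =====
-- def solution(keymap, targets):
--     keyCount = {chr(code): -1 for code in range(65, 91)}
--
--     # single sweep over the keymaps: relax each letter's best (1-based) position in place
--     for km in keymap:
--         for pos, ch in enumerate(km, 1):
--             if ch in keyCount and (keyCount[ch] == -1 or pos < keyCount[ch]):
--                 keyCount[ch] = pos
--
--     def cost(word):
--         total = 0
--         for ch in word:
--             v = keyCount[ch]
--             if v == -1:
--                 return -1
--             total += v
--         return total
--
--     return [cost(word) for word in targets]
-- ===== Notes on version B (the rewrite author's own statement) =====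
-- stated objective: alternative
-- what changed: A's per-letter build (26 scans of every keymap with 'in'/'.index', then min) is replaced by one relaxing sweep over the keymaps with enumerate, and the per-target accumulator loop with break is replaced by an early-return cost helper used in a list comprehension.
import Mathlib
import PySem

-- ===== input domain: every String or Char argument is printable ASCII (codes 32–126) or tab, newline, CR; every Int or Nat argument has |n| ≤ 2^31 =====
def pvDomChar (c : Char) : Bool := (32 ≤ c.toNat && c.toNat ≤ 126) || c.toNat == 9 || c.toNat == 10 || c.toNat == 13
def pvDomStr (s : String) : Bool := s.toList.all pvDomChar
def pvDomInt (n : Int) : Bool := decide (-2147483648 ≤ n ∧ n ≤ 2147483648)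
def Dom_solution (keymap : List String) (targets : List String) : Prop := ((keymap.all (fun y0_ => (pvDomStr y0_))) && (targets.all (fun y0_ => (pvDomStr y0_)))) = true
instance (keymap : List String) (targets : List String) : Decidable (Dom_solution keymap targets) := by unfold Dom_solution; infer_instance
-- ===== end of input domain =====

-- B replaces A's 26-entry per-letter build (one 'in'/'.index' scan over all keymaps per
-- letter, then min) by a single relaxing sweep over the keymaps, and A's accumulator
-- target loop with break by an early-return cost helper mapped over the targets.

-- ===== PORT A =====
-- target-cost loop of A: s accumulates; keyCount[t] == -1 breaks with s = -1.
-- (keyCount[t] raises KeyError for a target char outside A–Z: excluded by Pre_solution;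
--  inside Pre_ the key is always present, so the getD default is never read.)
def aCost (kc : PySem.Dict Char Int) (ts : List Char) (s : Int) : Int :=
  match ts with
  | [] => s
  | t :: rest => if kc.getD t (-1) ≠ -1 then aCost kc rest (s + kc.getD t (-1)) else (-1)

-- one iteration of A's `for i in range(26)` build loop
-- (`if indexs: keyCount[ch] = min(indexs) + 1`: min? is some exactly when indexs ≠ [];
--  km.index(ch) is guarded by `ch in km`, so it is Str.find, which is then ≥ 0)
def aStep (keymap : List String) (d : PySem.Dict Char Int) (i : Int) : PySem.Dict Char Int :=
  let ch := Char.ofNat (i + 65).toNat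
  let indexs : List Int :=
    (keymap.filter (fun km => PySem.Str.isIn (String.ofList [ch]) km)).map
      (fun km => PySem.Str.find km (String.ofList [ch]))
  match PySem.List.min? indexs (fun x => x) with
  | some m => d.insert ch (m + 1)
  | none => d

def solution (keymap : List String) (targets : List String) : List Int :=
  let keyCount : PySem.Dict Char Int :=
    (PySem.List.pyRange 0 26 1).foldl
      (fun d i => d.insert (Char.ofNat (i + 65).toNat) (-1)) PySem.Dict.empty
  let keyCount := (PySem.List.pyRange 0 26 1).foldl (aStep keymap) keyCount
  targets.foldl (fun answer target => answer ++ [aCost keyCount target.toList 0]) []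

-- ===== PORT B =====
-- body of B's inner `for pos, ch in enumerate(km, 1)` loop: relax keyCount[ch] to pos
-- (Python's `keyCount[ch] == -1 or pos < keyCount[ch]` reads keyCount[ch] only when
--  `ch in keyCount` held; the getD default is therefore never read)
def bStep (d : PySem.Dict Char Int) (p : Int × Char) : PySem.Dict Char Int :=
  if d.contains p.2 && (d.getD p.2 (-1) == -1 || decide (p.1 < d.getD p.2 (-1)))
  then d.insert p.2 p.1 else d

-- B's `cost(word)` helper: `v = keyCount[ch]` raises KeyError for a char outside A–Z
-- (excluded by Pre_solution; inside Pre_ the key is present, so the getD default is never read)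
def bCost (kc : PySem.Dict Char Int) (ts : List Char) (total : Int) : Int :=
  match ts with
  | [] => total
  | ch :: rest =>
    let v := kc.getD ch (-1)
    if v = -1 then -1 else bCost kc rest (total + v)

def solution_alt (keymap : List String) (targets : List String) : List Int :=
  let keyCount : PySem.Dict Char Int :=
    (PySem.List.pyRange 65 91 1).foldl
      (fun d code => d.insert (Char.ofNat code.toNat) (-1)) PySem.Dict.empty
  let keyCount := keymap.foldl
    (fun d km => (PySem.List.enumerate km.toList 1).foldl bStep d) keyCount
  targets.map (fun word => bCost keyCount word.toList 0)

-- ===== PRECONDITION & SPEC =====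
-- a character A's per-target loop gets past without breaking: an uppercase letter
-- occurring in at least one keymap (keyCount[c] ≠ -1)
def pvTypeable (keymap : List String) (c : Char) : Bool :=
  ('A' ≤ c && c ≤ 'Z') && keymap.any (fun km => decide (c ∈ km.toList))

-- Pre_ excludes exactly the inputs where A raises KeyError: some target whose first
-- non-typeable character lies outside 'A'..'Z' (A's loop reads keyCount[t] there;
-- earlier non-typeable letters make A break with -1 instead).
def Pre_solution (keymap : List String) (targets : List String) : Prop :=
  (targets.all (fun t =>
    match t.toList.dropWhile (fun c => pvTypeable keymap c) with
    | [] => true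
    | c :: _ => 'A' ≤ c && c ≤ 'Z')) = true
instance (keymap : List String) (targets : List String) : Decidable (Pre_solution keymap targets) := by unfold Pre_solution; infer_instance

def pvWitness_solution : List String × List String := (["ABACD", "BCEFD"], ["ABCD", "AABB"])

def Spec_solution (keymap : List String) (targets : List String) (out : List Int) : Prop := out = solution_alt keymap targets
instance (keymap : List String) (targets : List String) (out : List Int) : Decidable (Spec_solution keymap targets out) := by unfold Spec_solution; infer_instance

-- ===== CLAIM (what is proved, stated in full; the proofs are below) =====
def Claim_equal_solution : Prop := ∀ (keymap : List String) (targets : List String), Dom_solution keymap targets → Pre_solution keymap targets → Spec_solution keymap targets (solution keymap targets)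

-- ===== LEMMAS AND PROOFS =====

-- the relaxation both builds effectively perform on the -1-sentinel value
def relax (v p : Int) : Int := if v == -1 || decide (p < v) then p else v

-- `firsts c kms` = the 1-based first position of c in each keymap containing it
def firsts (c : Char) (kms : List String) : List Int :=
  (kms.filter (fun km => decide (c ∈ km.toList))).map (fun km => (km.toList.idxOf c : Int) + 1)

theorem char_le_A (c : Char) : 'A' ≤ c ↔ 65 ≤ c.toNat := by
  rw [Char.le_def, UInt32.le_iff_toNat_le]; rfl

theorem char_le_Z (c : Char) : c ≤ 'Z' ↔ c.toNat ≤ 90 := by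
  rw [Char.le_def, UInt32.le_iff_toNat_le]; rfl

theorem bStep_getD (d : PySem.Dict Char Int) (i : Int) (ch c : Char) :
    (bStep d (i, ch)).getD c (-1) =
      if ch = c ∧ d.contains c = true then relax (d.getD c (-1)) i
      else d.getD c (-1) := by
  unfold bStep relax
  by_cases hch : ch = c
  · subst hch
    by_cases hc : d.contains ch = true
    · simp only [hc, Bool.true_and, and_true]
      cases hg : (d.getD ch (-1) == -1 || decide (i < d.getD ch (-1))) <;>
        simp [hg, PySem.Dict.getD_insert]
    · simp [hc]
  · rw [if_neg (show ¬(ch = c ∧ d.contains c = true) from fun h => hch h.1)]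
    dsimp only
    split
    · rw [PySem.Dict.getD_insert, if_neg (Ne.symm hch)]
    · rfl

theorem bStep_contains (d : PySem.Dict Char Int) (p : Int × Char) (c : Char) :
    (bStep d p).contains c = d.contains c := by
  unfold bStep
  split
  · next h =>
      rw [PySem.Dict.contains_insert]
      rcases Bool.and_eq_true .. |>.mp h with ⟨h1, _⟩
      by_cases hc : c = p.2 <;> simp [hc, h1]
  · rfl

theorem relax_relax (v p q : Int) (h1 : 1 ≤ p) (hpq : p ≤ q) :
    relax (relax v p) q = relax v p := by
  unfold relax
  split_ifs with h a b c <;> simp_all <;> omega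

theorem bKm_getD (cs : List Char) (c : Char) (s : Int) (hs : 1 ≤ s)
    (d : PySem.Dict Char Int) :
    ((PySem.List.enumerate cs s).foldl bStep d).getD c (-1) =
      if c ∈ cs ∧ d.contains c = true then relax (d.getD c (-1)) (s + (cs.idxOf c : Int))
      else d.getD c (-1) := by
  induction cs generalizing s d with
  | nil => simp [PySem.List.enumerate_nil]
  | cons ch rest ih =>
      rw [PySem.List.enumerate_cons, List.foldl_cons,
        ih (s + 1) (by omega) (bStep d (s, ch)),
        bStep_contains, bStep_getD]
      by_cases hch : ch = c
      · subst hch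
        by_cases hc : d.contains ch = true
        · rw [if_pos (show ch = ch ∧ d.contains ch = true from ⟨rfl, hc⟩),
            if_pos (show ch ∈ ch :: rest ∧ d.contains ch = true from
              ⟨List.mem_cons_self, hc⟩),
            List.idxOf_cons_self]
          by_cases hm : ch ∈ rest
          · rw [if_pos (show ch ∈ rest ∧ d.contains ch = true from ⟨hm, hc⟩),
              relax_relax _ _ _ hs
                (by have := Int.natCast_nonneg (rest.idxOf ch); omega)]
            norm_num
          · rw [if_neg (show ¬(ch ∈ rest ∧ d.contains ch = true) from fun h => hm h.1)]
            norm_num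
        · simp [hc]
      · rw [if_neg (show ¬(ch = c ∧ d.contains c = true) from fun h => hch h.1)]
        by_cases hc : d.contains c = true
        · by_cases hm : c ∈ rest
          · rw [if_pos (show c ∈ rest ∧ d.contains c = true from ⟨hm, hc⟩),
              if_pos (show c ∈ ch :: rest ∧ d.contains c = true from
                ⟨List.mem_cons_of_mem _ hm, hc⟩),
              List.idxOf_cons_ne _ hch]
            congr 1
            push_cast [Nat.succ_eq_add_one]
            ring
          · rw [if_neg (show ¬(c ∈ rest ∧ d.contains c = true) from fun h => hm h.1),
              if_neg (show ¬(c ∈ ch :: rest ∧ d.contains c = true) from fun h => by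
                rcases List.mem_cons.mp h.1 with h' | h'
                · exact hch h'.symm
                · exact hm h')]
        · simp [hc]

theorem bBuild_getD (kms : List String) (d : PySem.Dict Char Int) (c : Char) :
    (kms.foldl (fun d km => (PySem.List.enumerate km.toList 1).foldl bStep d) d).getD c (-1) =
      if d.contains c = true then List.foldl relax (d.getD c (-1)) (firsts c kms)
      else d.getD c (-1) := by
  induction kms generalizing d with
  | nil => simp [firsts]
  | cons km rest ih =>
      have hcont : ∀ (e : PySem.Dict Char Int),
          ((PySem.List.enumerate km.toList 1).foldl bStep e).contains c = e.contains c := by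
        intro e
        generalize PySem.List.enumerate km.toList 1 = ps
        induction ps generalizing e with
        | nil => rfl
        | cons p ps ihp => rw [List.foldl_cons, ihp, bStep_contains]
      rw [List.foldl_cons, ih, hcont, bKm_getD _ _ _ le_rfl]
      by_cases hc : d.contains c = true
      · rw [if_pos hc, if_pos hc]
        unfold firsts
        by_cases hm : c ∈ km.toList
        · rw [if_pos (show c ∈ km.toList ∧ d.contains c = true from ⟨hm, hc⟩),
            List.filter_cons_of_pos (by simpa), List.map_cons, List.foldl_cons]
          norm_num [add_comm]
        · rw [if_neg (show ¬(c ∈ km.toList ∧ d.contains c = true) from fun h => hm h.1),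
            List.filter_cons_of_neg (by simpa)]
      · simp [hc]

def vA (keymap : List String) (c : Char) (old : Int) : Int :=
  match PySem.List.min?
      ((keymap.filter (fun km => PySem.Str.isIn (String.ofList [c]) km)).map
        (fun km => PySem.Str.find km (String.ofList [c]))) (fun x => x) with
  | some m => m + 1
  | none => old

theorem aStep_eq (keymap : List String) (d : PySem.Dict Char Int) (i : Int) (c : Char) :
    (aStep keymap d i).getD c (-1) =
      if Char.ofNat (i + 65).toNat = c then vA keymap c (d.getD c (-1))
      else d.getD c (-1) := by
  unfold aStep vA
  dsimp only
  by_cases h : Char.ofNat (i + 65).toNat = c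
  · rw [if_pos h, h]
    split <;> simp_all [PySem.Dict.getD_insert]
  · rw [if_neg h]
    split <;> simp_all [PySem.Dict.getD_insert, Ne.symm h]

theorem vA_vA (keymap : List String) (c : Char) (old : Int) :
    vA keymap c (vA keymap c old) = vA keymap c old := by
  unfold vA
  cases hmin : PySem.List.min?
      ((keymap.filter (fun km => PySem.Str.isIn (String.ofList [c]) km)).map
        (fun km => PySem.Str.find km (String.ofList [c]))) (fun x => x) <;> simp

theorem aBuild_getD (is : List Int) (keymap : List String) (d : PySem.Dict Char Int) (c : Char) :
    (is.foldl (aStep keymap) d).getD c (-1) =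
      if is.any (fun i => Char.ofNat (i + 65).toNat == c) then vA keymap c (d.getD c (-1))
      else d.getD c (-1) := by
  induction is generalizing d with
  | nil => simp
  | cons i is ih =>
      rw [List.foldl_cons, ih, aStep_eq, List.any_cons]
      by_cases h : Char.ofNat (i + 65).toNat = c
      · simp only [h, if_pos rfl, beq_self_eq_true, Bool.true_or, if_pos]
        split <;> [exact vA_vA keymap c _; rfl]
      · rw [if_neg h, show ((Char.ofNat (i + 65).toNat == c) = false) by simpa, Bool.false_or]

theorem singleton_prefix_iff (c : Char) (l : List Char) : [c] <+: l ↔ l[0]? = some c := by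
  cases l with
  | nil => simp
  | cons a t =>
      constructor
      · rintro ⟨r, hr⟩; cases hr; simp
      · intro h; simp at h; subst h; exact ⟨t, rfl⟩

theorem idxOf_le_of_getElem? (c : Char) (l : List Char) (n : Nat) (h : l[n]? = some c) :
    l.idxOf c ≤ n := by
  induction l generalizing n with
  | nil => simp at h
  | cons a t ih =>
      by_cases hac : a = c
      · subst hac; simp
      · cases n with
        | zero => simp_all
        | succ m =>
            rw [List.idxOf_cons_ne _ hac]
            exact Nat.succ_le_succ (ih m (by simpa using h))

theorem find_singleton (c : Char) (cs : List Char) (h : c ∈ cs) :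
    PySem.Chars.find cs [c] = (cs.idxOf c : Int) := by
  have h0 : 0 ≤ PySem.Chars.find cs [c] :=
    (PySem.Chars.find_nonneg_iff cs [c]).mpr ((List.singleton_infix_iff c cs).mpr h)
  obtain ⟨hpre, hminl⟩ := PySem.Chars.find_spec h0
  set n := (PySem.Chars.find cs [c]).toNat with hn
  have hcn : cs[n]? = some c := by
    have := (singleton_prefix_iff c (cs.drop n)).mp hpre
    simpa [List.getElem?_drop] using this
  have h1 : cs.idxOf c ≤ n := idxOf_le_of_getElem? c cs n hcn
  have h2 : ¬ (cs.idxOf c < n) := by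
    intro hlt
    exact hminl _ hlt ((singleton_prefix_iff c (cs.drop (cs.idxOf c))).mpr
      (by simpa [List.getElem?_drop] using List.getElem?_idxOf h))
  omega

theorem relax_neg_one (p : Int) : relax (-1) p = p := by simp [relax]

theorem relax_of_ne (v p : Int) (hv : v ≠ -1) : relax v p = min v p := by
  unfold relax
  have hb : (v == -1) = false := by simpa using hv
  rw [hb, Bool.false_or]
  by_cases h : p < v
  · rw [if_pos (by simpa using h)]; exact (min_eq_right (by omega)).symm
  · rw [if_neg (by simpa using h)]; exact (min_eq_left (by omega)).symm

theorem foldl_relax_min (t : List Int) (v : Int) (hv : v ≠ -1) (ht : ∀ y ∈ t, 1 ≤ y) :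
    List.foldl relax v t = List.foldl min v t := by
  induction t generalizing v with
  | nil => rfl
  | cons p t ih =>
      rw [List.foldl_cons, List.foldl_cons, relax_of_ne v p hv]
      exact ih (min v p) (by have := ht p (by simp); rcases min_choice v p with h | h <;> omega)
        (fun y hy => ht y (by simp [hy]))

theorem foldl_min_map_add (t : List Int) (x : Int) :
    (t.map (fun y => y + 1)).foldl min (x + 1) = t.foldl min x + 1 := by
  induction t generalizing x with
  | nil => rfl
  | cons p t ih => rw [List.map_cons, List.foldl_cons, List.foldl_cons, min_add_add_right]; exact ih _

theorem vA_eq_foldl_relax (keymap : List String) (c : Char) :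
    vA keymap c (-1) = List.foldl relax (-1) (firsts c keymap) := by
  unfold vA firsts
  have hfilter : keymap.filter (fun km => PySem.Str.isIn (String.ofList [c]) km)
      = keymap.filter (fun km => decide (c ∈ km.toList)) := by
    apply List.filter_congr
    intro km _
    have hiff : PySem.Str.isIn (String.ofList [c]) km = true ↔ c ∈ km.toList := by
      rw [PySem.Str.isIn_iff_infix]
      constructor
      · intro h; exact (List.singleton_infix_iff c km.toList).mp (by simpa using h)
      · intro h; simpa using (List.singleton_infix_iff c km.toList).mpr h
    rw [Bool.eq_iff_iff, hiff, decide_eq_true_iff]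
  rw [hfilter]
  cases hF : keymap.filter (fun km => decide (c ∈ km.toList)) with
  | nil =>
      rw [List.map_nil, List.map_nil, List.foldl_nil,
        (PySem.List.min?_eq_none_iff _ _).mpr rfl]
  | cons km0 F' =>
      have hmemF : ∀ km ∈ km0 :: F', c ∈ km.toList := by
        intro km hkm
        have := List.mem_filter.mp (hF ▸ hkm)
        simpa using this.2
      have hfind : ∀ km ∈ km0 :: F',
          PySem.Str.find km (String.ofList [c]) = (km.toList.idxOf c : Int) := by
        intro km hkm
        rw [PySem.Str.find_eq, String.toList_ofList, find_singleton c km.toList (hmemF km hkm)]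
      have hsplit : ∀ (L : List String),
          L.map (fun km => (km.toList.idxOf c : Int) + 1)
            = (L.map (fun km => (km.toList.idxOf c : Int))).map (fun y => y + 1) := by
        intro L; induction L <;> simp_all
      rw [List.map_congr_left hfind, hsplit, List.map_cons, List.map_cons,
        PySem.List.min?_id_cons, List.foldl_cons, relax_neg_one,
        foldl_relax_min _ _ (by have := Int.natCast_nonneg (km0.toList.idxOf c); omega)
          (by
            rintro y hy
            simp only [List.mem_map] at hy
            obtain ⟨z, ⟨km, _, rfl⟩, rfl⟩ := hy
            have := Int.natCast_nonneg (km.toList.idxOf c); omega),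
        foldl_min_map_add]

theorem init_getD (is : List Int) (key : Int → Char) (d : PySem.Dict Char Int) (c : Char)
    (hd : d.getD c (-1) = -1) :
    (is.foldl (fun d i => d.insert (key i) (-1)) d).getD c (-1) = -1 := by
  induction is generalizing d with
  | nil => exact hd
  | cons i is ih =>
      simp only [List.foldl_cons]
      exact ih _ (by rw [PySem.Dict.getD_insert]; split <;> simp [hd])

theorem init_contains (is : List Int) (key : Int → Char) (d : PySem.Dict Char Int) (c : Char) :
    (is.foldl (fun d i => d.insert (key i) (-1)) d).contains c =
      (is.any (fun i => key i == c) || d.contains c) := by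
  induction is generalizing d with
  | nil => simp
  | cons i is ih =>
      simp only [List.foldl_cons, List.any_cons, ih, PySem.Dict.contains_insert]
      by_cases h : key i = c
      · subst h; simp
      · rw [show (key i == c) = false by simp [h],
           show (c == key i) = false by simp [Ne.symm h]]
        simp

-- range(26) under i ↦ chr(i+65) produces exactly the letters 'A'..'Z'
theorem any26_iff (c : Char) :
    (PySem.List.pyRange 0 26 1).any (fun i => Char.ofNat (i + 65).toNat == c) = true ↔
      ('A' ≤ c ∧ c ≤ 'Z') := by
  rw [List.any_eq_true, char_le_A, char_le_Z]
  constructor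
  · rintro ⟨i, hi, hc⟩
    have hi' := PySem.List.mem_pyRange_one.mp hi
    have hc' : Char.ofNat (i + 65).toNat = c := by simpa using hc
    have hv : c.toNat = i.toNat + 65 := by
      rw [← hc', show (i + 65).toNat = i.toNat + 65 by omega,
        Char.toNat_ofNat, if_pos (Or.inl (by omega))]
    omega
  · rintro ⟨h1, h2⟩
    refine ⟨(c.toNat : Int) - 65, PySem.List.mem_pyRange_one.mpr (by omega), ?_⟩
    have ht : ((c.toNat : Int) - 65 + 65).toNat = c.toNat := by omega
    simp [ht, Char.ofNat_toNat]

-- range(65, 91) under chr produces exactly the letters 'A'..'Z' too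
theorem any65_iff (c : Char) :
    (PySem.List.pyRange 65 91 1).any (fun code => Char.ofNat code.toNat == c) = true ↔
      ('A' ≤ c ∧ c ≤ 'Z') := by
  rw [List.any_eq_true, char_le_A, char_le_Z]
  constructor
  · rintro ⟨code, hc0, hc⟩
    have hc0' := PySem.List.mem_pyRange_one.mp hc0
    have hc' : Char.ofNat code.toNat = c := by simpa using hc
    have hv : c.toNat = code.toNat := by
      rw [← hc', Char.toNat_ofNat, if_pos (Or.inl (by omega))]
    omega
  · rintro ⟨h1, h2⟩
    refine ⟨(c.toNat : Int), PySem.List.mem_pyRange_one.mpr (by omega), ?_⟩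
    simp [Char.ofNat_toNat]

-- A's dense keyCount (26-pass build) and B's keyCount (one relaxing sweep) agree everywhere
theorem keyCounts_agree (keymap : List String) (c : Char) :
    ((PySem.List.pyRange 0 26 1).foldl (aStep keymap)
      ((PySem.List.pyRange 0 26 1).foldl
        (fun d i => d.insert (Char.ofNat (i + 65).toNat) (-1)) PySem.Dict.empty)).getD c (-1)
    =
    (keymap.foldl (fun d km => (PySem.List.enumerate km.toList 1).foldl bStep d)
      ((PySem.List.pyRange 65 91 1).foldl
        (fun d code => d.insert (Char.ofNat code.toNat) (-1)) PySem.Dict.empty)).getD c (-1) := by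
  have hA0 : ((PySem.List.pyRange 0 26 1).foldl
      (fun d i => d.insert (Char.ofNat (i + 65).toNat) (-1)) PySem.Dict.empty).getD c (-1) = -1 :=
    init_getD _ _ _ _ (by simp [PySem.Dict.getD_empty])
  have hB0 : ((PySem.List.pyRange 65 91 1).foldl
      (fun d code => d.insert (Char.ofNat code.toNat) (-1)) PySem.Dict.empty).getD c (-1) = -1 :=
    init_getD _ _ _ _ (by simp [PySem.Dict.getD_empty])
  have hBc : ((PySem.List.pyRange 65 91 1).foldl
      (fun d code => d.insert (Char.ofNat code.toNat) (-1)) PySem.Dict.empty).contains c =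
      (PySem.List.pyRange 65 91 1).any (fun code => Char.ofNat code.toNat == c) := by
    rw [init_contains, PySem.Dict.contains_empty, Bool.or_false]
  rw [aBuild_getD, bBuild_getD, hA0, hB0, hBc]
  by_cases hr : 'A' ≤ c ∧ c ≤ 'Z'
  · rw [if_pos ((any26_iff c).mpr hr), if_pos ((any65_iff c).mpr hr), vA_eq_foldl_relax]
  · rw [if_neg (fun h => hr ((any26_iff c).mp h)),
      if_neg (fun h => hr ((any65_iff c).mp h))]

theorem cost_congr (kc1 kc2 : PySem.Dict Char Int)
    (h : ∀ t, kc1.getD t (-1) = kc2.getD t (-1)) (ts : List Char) (s : Int) :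
    aCost kc1 ts s = bCost kc2 ts s := by
  induction ts generalizing s with
  | nil => rfl
  | cons t rest ih =>
      simp only [aCost, bCost, h]
      by_cases hv : kc2.getD t (-1) = -1
      · rw [if_neg (by omega), if_pos hv]
      · rw [if_pos hv, if_neg hv, ih]

-- ===== VERDICT (by name: the statement is the Claim_ definition above) =====
theorem solution_spec : Claim_equal_solution := by
  intro keymap targets _ _
  unfold Spec_solution solution solution_alt
  simp only [PySem.List.foldl_append_singleton_eq_map]
  exact List.map_congr_left (fun t _ => cost_congr _ _ (keyCounts_agree keymap) _ _)
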